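-- pv_equiv track=rewrite | github.com/AlisonB319/Code-Samples | Python-Code-Questions.py | lookupVal
-- ===== SOURCE A (Python) =====
-- def lookupVal(L, k):
--     num = 0
--     item = 0
--     found = False
--     if L == [{}]:
--         return None
--     for i in range(len(L)):
--         if k in L[i]:
--             item = k
--             num = i
--             found = True
--     if found:
--         return L[num][item]
--     else:
--         return None
-- ===== SOURCE B (Python) =====
-- def lookupVal(L, k):
--     for i in range(len(L) - 1, -1, -1):
--         if k in L[i]:
--             return L[i][k]
--     return None
-- ===== Notes on version B (the rewrite author's own statement) =====
-- stated objective: simpler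
-- what changed: B scans the list backwards and returns on the first dict containing k (early exit), instead of A's forward scan that keeps overwriting a running index plus a redundant [{}] guard.
import Mathlib
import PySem

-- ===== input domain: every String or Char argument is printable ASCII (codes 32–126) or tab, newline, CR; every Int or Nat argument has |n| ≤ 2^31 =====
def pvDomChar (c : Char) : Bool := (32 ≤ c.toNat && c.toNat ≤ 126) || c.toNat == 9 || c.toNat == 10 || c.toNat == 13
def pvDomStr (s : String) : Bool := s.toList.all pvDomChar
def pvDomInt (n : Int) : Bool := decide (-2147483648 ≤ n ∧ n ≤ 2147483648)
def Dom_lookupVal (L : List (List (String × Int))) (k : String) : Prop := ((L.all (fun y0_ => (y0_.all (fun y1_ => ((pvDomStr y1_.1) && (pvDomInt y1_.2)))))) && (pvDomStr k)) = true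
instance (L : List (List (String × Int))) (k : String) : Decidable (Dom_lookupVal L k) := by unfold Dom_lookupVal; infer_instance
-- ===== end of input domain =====

-- B scans the list backwards and returns at the first dict containing k; A scans forward,
-- overwriting a running index, with a redundant [{}] guard. Same return value, simpler control flow.

-- first-match lookup in an association list (the dict under the type convention)
def pvGetK (d : List (String × Int)) (k : String) : Option Int :=
  (d.find? (fun p => p.1 == k)).map (·.2)

-- ===== PORT A =====
-- A's loop state: (num, found); 'item' is always k when found, kept implicit (when found,
-- the final lookup L[num][item] is L[num][k]).
def lookupVal (L : List (List (String × Int))) (k : String) : Option Int :=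
  if L = [[]] then none
  else
    let st := (List.range L.length).foldl
      (fun (s : Nat × Bool) i => if (pvGetK (L.getD i []) k).isSome then (i, true) else s)
      (0, false)
    if st.2 then pvGetK (L.getD st.1 []) k else none

-- ===== PORT B =====
-- B's backwards index loop: i = n-1, n-2, …, 0; return on first dict containing k.
def lookupValAltGo (L : List (List (String × Int))) (k : String) : Nat → Option Int
  | 0 => none
  | n + 1 =>
    match pvGetK (L.getD n []) k with
    | some v => some v
    | none => lookupValAltGo L k n

def lookupVal_alt (L : List (List (String × Int))) (k : String) : Option Int :=
  lookupValAltGo L k L.length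

-- ===== PRECONDITION & SPEC =====
def Spec_lookupVal (L : List (List (String × Int))) (k : String) (out : Option Int) : Prop := out = lookupVal_alt L k
instance (L : List (List (String × Int))) (k : String) (out : Option Int) : Decidable (Spec_lookupVal L k out) := by unfold Spec_lookupVal; infer_instance

-- ===== CLAIM (what is proved, stated in full; the proofs are below) =====
def Claim_equal_lookupVal : Prop := ∀ (L : List (List (String × Int))) (k : String), Dom_lookupVal L k → Spec_lookupVal L k (lookupVal L k)

-- ===== LEMMAS AND PROOFS =====

theorem lookupValAltGo_succ (L : List (List (String × Int))) (k : String) (n : Nat) :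
    lookupValAltGo L k (n + 1) =
      match pvGetK (L.getD n []) k with
      | some v => some v
      | none => lookupValAltGo L k n := rfl

-- the body of A's fold, named for the lemmas
def pvStepA (L : List (List (String × Int))) (k : String) (s : Nat × Bool) (i : Nat) : Nat × Bool :=
  if (pvGetK (L.getD i []) k).isSome then (i, true) else s

-- if the backwards scan of the first n dicts finds nothing, A's fold over range n leaves its state alone
theorem foldA_of_go_none (L : List (List (String × Int))) (k : String) :
    ∀ n (s : Nat × Bool), lookupValAltGo L k n = none →
      (List.range n).foldl (pvStepA L k) s = s := by
  intro n
  induction n with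
  | zero => intro s _; simp
  | succ n ih =>
    intro s h
    rw [List.range_succ, List.foldl_append]
    rw [lookupValAltGo_succ] at h
    by_cases hg : (pvGetK (L.getD n []) k).isSome
    · obtain ⟨v, hv⟩ := Option.isSome_iff_exists.mp hg
      rw [hv] at h
      exact absurd h (by simp)
    · have hnone : pvGetK (L.getD n []) k = none := Option.not_isSome_iff_eq_none.mp hg
      rw [hnone] at h
      simp only [List.foldl_cons, List.foldl_nil]
      rw [ih s h]
      unfold pvStepA; rw [hnone]; simp

-- if the backwards scan of the first n dicts returns v, A's fold over range n ends at the last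
-- matching index i, and the lookup there gives v
theorem foldA_of_go_some (L : List (List (String × Int))) (k : String) :
    ∀ n (s : Nat × Bool) v, lookupValAltGo L k n = some v →
      ∃ i, (List.range n).foldl (pvStepA L k) s = (i, true) ∧ pvGetK (L.getD i []) k = some v := by
  intro n
  induction n with
  | zero => intro s v h; simp [lookupValAltGo] at h
  | succ n ih =>
    intro s v h
    rw [List.range_succ, List.foldl_append]
    simp only [List.foldl_cons, List.foldl_nil]
    rw [lookupValAltGo_succ] at h
    by_cases hg : (pvGetK (L.getD n []) k).isSome
    · obtain ⟨w, hw⟩ := Option.isSome_iff_exists.mp hg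
      rw [hw] at h
      have hwv : w = v := by simpa using h
      refine ⟨n, ?_, ?_⟩
      · unfold pvStepA; rw [hw]; simp
      · rw [hw, hwv]
    · have hnone : pvGetK (L.getD n []) k = none := Option.not_isSome_iff_eq_none.mp hg
      rw [hnone] at h
      obtain ⟨i, hfold, hget⟩ := ih s v h
      exact ⟨i, by rw [hfold]; unfold pvStepA; rw [hnone]; simp, hget⟩

-- ===== VERDICT (by name: the statement is the Claim_ definition above) =====
theorem lookupVal_spec : Claim_equal_lookupVal := by
  unfold Claim_equal_lookupVal
  intro L k _
  unfold Spec_lookupVal lookupVal lookupVal_alt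
  by_cases hguard : L = [[]]
  · subst hguard
    simp [lookupValAltGo, pvGetK]
  · simp only [hguard, if_false]
    change (if ((List.range L.length).foldl (pvStepA L k) (0, false)).2 then
              pvGetK (L.getD ((List.range L.length).foldl (pvStepA L k) (0, false)).1 []) k
            else none) = _
    cases hgo : lookupValAltGo L k L.length with
    | none =>
      rw [foldA_of_go_none L k L.length (0, false) hgo]
      simp [hgo]
    | some v =>
      obtain ⟨i, hfold, hget⟩ := foldA_of_go_some L k L.length (0, false) v hgo
      rw [hfold]
      simpa using hget
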